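-- pv_equiv track=rewrite | github.com/mzffreyvazov/4sim-gov-ai-mvp | taskb/utils/ai_agents.py | _clean_csv_output
-- ===== SOURCE A (Python) =====
-- def _clean_csv_output(csv_output: str) -> str:
--     """Clean the LLM output to ensure it's valid CSV"""
--     # Remove any markdown formatting
--     if "```csv" in csv_output:
--         csv_output = csv_output.split("```csv")[1].strip()
--     if "```" in csv_output:
--         csv_output = csv_output.split("```")[0].strip()
--
--     # Remove any explanatory text that might be before or after CSV
--     lines = csv_output.strip().split('\n')
--
--     # Find the start of actual CSV data (first line with commas)
--     start_idx = 0
--     for i, line in enumerate(lines):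
--         if ',' in line and not line.strip().startswith('#'):
--             start_idx = i
--             break
--
--     # Find the end of CSV data (last line with commas)
--     end_idx = len(lines) - 1
--     for i in range(len(lines) - 1, -1, -1):
--         if ',' in lines[i] and not lines[i].strip().startswith('#'):
--             end_idx = i
--             break
--
--     # Extract only the CSV portion
--     csv_lines = lines[start_idx:end_idx + 1]
--
--     return '\n'.join(csv_lines).strip()
-- ===== SOURCE B (Python) =====
-- def _is_csv_line(line):
--     return ',' in line and not line.strip().startswith('#')
--
--
-- def _clean_csv_output(csv_output: str) -> str:
--     """Clean the LLM output to ensure it's valid CSV"""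
--     # Remove any markdown formatting
--     if "```csv" in csv_output:
--         csv_output = csv_output.split("```csv")[1].strip()
--     if "```" in csv_output:
--         csv_output = csv_output.split("```")[0].strip()
--
--     lines = csv_output.strip().split('\n')
--
--     # Trim the non-CSV garbage off both ends; if no CSV line exists at all,
--     # keep everything (the original's fallback behaviour).
--     if any(_is_csv_line(line) for line in lines):
--         while not _is_csv_line(lines[0]):
--             lines.pop(0)
--         while not _is_csv_line(lines[-1]):
--             lines.pop()
--
--     return '\n'.join(lines).strip()
-- ===== Notes on version B (the rewrite author's own statement) =====
-- stated objective: alternative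
-- what changed: Instead of computing a start index (forward break-scan), an end index (backward break-scan over range(len-1,-1,-1)) and slicing, B tests once whether any CSV line exists and then destructively trims non-CSV lines off both ends of the list with two while/pop loops, never touching an index.
import Mathlib
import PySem

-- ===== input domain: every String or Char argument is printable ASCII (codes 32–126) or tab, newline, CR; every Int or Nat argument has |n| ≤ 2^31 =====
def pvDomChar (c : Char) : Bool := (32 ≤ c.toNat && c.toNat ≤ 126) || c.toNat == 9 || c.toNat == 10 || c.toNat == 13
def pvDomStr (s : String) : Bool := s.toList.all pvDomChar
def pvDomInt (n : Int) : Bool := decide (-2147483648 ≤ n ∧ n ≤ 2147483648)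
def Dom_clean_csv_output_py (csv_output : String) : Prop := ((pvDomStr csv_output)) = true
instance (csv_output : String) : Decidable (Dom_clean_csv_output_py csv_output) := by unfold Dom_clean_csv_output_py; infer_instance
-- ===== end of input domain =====

-- B replaces A's index bookkeeping (forward break-scan for start_idx, backward
-- break-scan for end_idx, then a slice) by destructively trimming non-CSV lines
-- off both ends of the list, guarded by an any() existence test (objective: alternative).

-- shared helpers: the markdown-stripping prelude and the CSV-line predicate are
-- identical code in both Pythons, ported once.
-- sep is a nonempty literal at every call site, so split? never returns none
def pvSplit (s sep : String) : List String := (PySem.Str.split? s sep).getD []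

def pvCsvLine (line : String) : Bool :=
  PySem.Str.isIn "," line && !(PySem.Str.startswith (PySem.Str.strip line) "#")

def pvPrelude (s : String) : List String :=
  let s1 := if PySem.Str.isIn "```csv" s then
      PySem.Str.strip ((PySem.List.pyGet? (pvSplit s "```csv") 1).getD "") else s
  let s2 := if PySem.Str.isIn "```" s1 then
      PySem.Str.strip ((PySem.List.pyGet? (pvSplit s1 "```") 0).getD "") else s1
  pvSplit (PySem.Str.strip s2) "\n"

-- ===== PORT A =====
-- forward scan with break: 'start_idx = 0; for i, line in enumerate(lines): if …: start_idx = i; break'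
def pvAStart : List String → Int → Int
  | [], _ => 0
  | l :: rest, i => if pvCsvLine l then i else pvAStart rest (i + 1)

-- backward scan with break over range(len(lines)-1, -1, -1); iterating that index list
-- visits lines.reverse with a decreasing counter, default end_idx = len(lines) - 1
def pvAEnd : List String → Int → Int → Int
  | [], _, dflt => dflt
  | l :: rest, i, dflt => if pvCsvLine l then i else pvAEnd rest (i - 1) dflt

def clean_csv_output_py (csv_output : String) : String :=
  let lines := pvPrelude csv_output
  let start_idx := pvAStart lines 0
  let end_idx := pvAEnd lines.reverse ((lines.length : Int) - 1) ((lines.length : Int) - 1)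
  PySem.Str.strip (PySem.Str.join "\n" (PySem.List.slice lines (some start_idx) (some (end_idx + 1))))

-- ===== PORT B =====
-- 'while not _is_csv_line(lines[0]): lines.pop(0)' is dropWhile at the front;
-- 'while not _is_csv_line(lines[-1]): lines.pop()' is dropWhile at the back
-- (ported as reverse / dropWhile / reverse); both run only under the any() guard.
def clean_csv_output_py_alt (csv_output : String) : String :=
  let lines := pvPrelude csv_output
  let trimmed :=
    if lines.any pvCsvLine then
      (((lines.dropWhile (fun l => !pvCsvLine l)).reverse.dropWhile
          (fun l => !pvCsvLine l)).reverse)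
    else lines
  PySem.Str.strip (PySem.Str.join "\n" trimmed)

-- ===== PRECONDITION & SPEC =====
def Spec_clean_csv_output_py (csv_output : String) (out : String) : Prop := out = clean_csv_output_py_alt csv_output
instance (csv_output : String) (out : String) : Decidable (Spec_clean_csv_output_py csv_output out) := by unfold Spec_clean_csv_output_py; infer_instance

-- ===== CLAIM (what is proved, stated in full; the proofs are below) =====
def Claim_equal_clean_csv_output_py : Prop := ∀ (csv_output : String), Dom_clean_csv_output_py csv_output → Spec_clean_csv_output_py csv_output (clean_csv_output_py csv_output)

-- ===== LEMMAS AND PROOFS =====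

-- A's forward scan: no match → it returns the default 0
theorem pvAStart_of_none (xs : List String) (h : xs.any pvCsvLine = false) :
    ∀ (i : Int), pvAStart xs i = 0 := by
  induction xs with
  | nil => intro i; rfl
  | cons l rest ih =>
    intro i
    simp only [List.any_cons, Bool.or_eq_false_iff] at h
    simp [pvAStart, h.1, ih h.2]

-- A's backward scan: no match → it returns the default
theorem pvAEnd_of_none (xs : List String) (h : xs.any pvCsvLine = false) :
    ∀ (j dflt : Int), pvAEnd xs j dflt = dflt := by
  induction xs with
  | nil => intro j dflt; rfl
  | cons l rest ih =>
    intro j dflt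
    simp only [List.any_cons, Bool.or_eq_false_iff] at h
    simp [pvAEnd, h.1, ih h.2]

-- A's forward scan: a match exists → first match index = i + length of the ¬csv prefix
theorem pvAStart_of_any (xs : List String) (h : xs.any pvCsvLine = true) :
    ∀ (i : Int), pvAStart xs i = i + ((xs.takeWhile (fun l => !pvCsvLine l)).length : Int) := by
  induction xs with
  | nil => simp at h
  | cons l rest ih =>
    intro i
    by_cases hl : pvCsvLine l = true
    · simp [pvAStart, List.takeWhile, hl]
    · have hl' : pvCsvLine l = false := by simpa using hl
      have hrest : rest.any pvCsvLine = true := by simpa [hl'] using h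
      simp only [pvAStart, List.takeWhile, hl', Bool.not_false, List.length_cons, ih hrest (i + 1)]
      push_cast; ring

-- A's backward scan, same characterisation (scans xs with a decreasing counter)
theorem pvAEnd_of_any (xs : List String) (h : xs.any pvCsvLine = true) :
    ∀ (j dflt : Int), pvAEnd xs j dflt = j - ((xs.takeWhile (fun l => !pvCsvLine l)).length : Int) := by
  induction xs with
  | nil => simp at h
  | cons l rest ih =>
    intro j dflt
    by_cases hl : pvCsvLine l = true
    · simp [pvAEnd, List.takeWhile, hl]
    · have hl' : pvCsvLine l = false := by simpa using hl
      have hrest : rest.any pvCsvLine = true := by simpa [hl'] using h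
      simp only [pvAEnd, List.takeWhile, hl', Bool.not_false, List.length_cons, ih hrest (j - 1) dflt]
      push_cast; ring

-- takeWhile ignores the appended tail when the first list already contains a failure
theorem takeWhile_append_of_mem_neg {α : Type} (q : α → Bool) (u v : List α)
    (h : ∃ x ∈ u, q x = false) : (u ++ v).takeWhile q = u.takeWhile q := by
  induction u with
  | nil => simp at h
  | cons a u ih =>
    by_cases ha : q a = true
    · have h' : ∃ x ∈ u, q x = false := by
        rcases h with ⟨x, hx, hqx⟩
        rcases List.mem_cons.mp hx with rfl | hxu
        · exact absurd ha (by simp [hqx])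
        · exact ⟨x, hxu, hqx⟩
      simp [List.takeWhile, ha, ih h']
    · have ha' : q a = false := by simpa using ha
      simp [List.takeWhile, ha']

-- dropWhile = drop (length of the takeWhile prefix)
theorem dropWhile_eq_drop {α : Type} (q : α → Bool) (l : List α) :
    l.dropWhile q = l.drop (l.takeWhile q).length := by
  induction l with
  | nil => rfl
  | cons a l ih =>
    by_cases ha : q a = true
    · simp [List.dropWhile, List.takeWhile, ha, ih]
    · have ha' : q a = false := by simpa using ha
      simp [List.dropWhile, List.takeWhile, ha']

-- the slice A takes equals B's double end-trim, when a CSV line exists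
theorem slice_eq_trim (lines : List String) (h : lines.any pvCsvLine = true) :
    (lines.drop (lines.takeWhile (fun l => !pvCsvLine l)).length).take
        (lines.length - (lines.reverse.takeWhile (fun l => !pvCsvLine l)).length
          - (lines.takeWhile (fun l => !pvCsvLine l)).length)
      = ((lines.dropWhile (fun l => !pvCsvLine l)).reverse.dropWhile
          (fun l => !pvCsvLine l)).reverse := by
  set q : String → Bool := fun l => !pvCsvLine l with hq
  set D := lines.dropWhile q with hD
  have hDdrop : D = lines.drop (lines.takeWhile q).length := dropWhile_eq_drop q lines
  have hmemDr : ∃ x ∈ D.reverse, q x = false := by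
    rcases List.any_eq_true.mp h with ⟨x, hx, hpx⟩
    have hxapp : x ∈ lines.takeWhile q ++ D := by
      rw [hD, List.takeWhile_append_dropWhile]; exact hx
    rcases List.mem_append.mp hxapp with hxt | hxd
    · exact absurd (List.mem_takeWhile_imp hxt) (by simp [hq, hpx])
    · exact ⟨x, List.mem_reverse.mpr hxd, by simp [hq, hpx]⟩
  have hrev : lines.reverse = D.reverse ++ (lines.takeWhile q).reverse := by
    conv_lhs => rw [← List.takeWhile_append_dropWhile (p := q) (l := lines)]
    simp [hD]
  have hk : lines.reverse.takeWhile q = D.reverse.takeWhile q := by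
    rw [hrev, takeWhile_append_of_mem_neg q _ _ hmemDr]
  have hlenD : D.length = lines.length - (lines.takeWhile q).length := by
    rw [hDdrop, List.length_drop]
  calc (lines.drop (lines.takeWhile q).length).take
        (lines.length - (lines.reverse.takeWhile q).length - (lines.takeWhile q).length)
      = D.take (D.length - (D.reverse.takeWhile q).length) := by
        rw [← hDdrop, hk]
        congr 1
        omega
    _ = (D.reverse.dropWhile q).reverse := by
        rw [dropWhile_eq_drop q D.reverse, List.drop_reverse, List.reverse_reverse]

-- ===== VERDICT (by name: the statement is the Claim_ definition above) =====
theorem clean_csv_output_py_spec : Claim_equal_clean_csv_output_py := by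
  intro s _
  show clean_csv_output_py s = clean_csv_output_py_alt s
  simp only [clean_csv_output_py, clean_csv_output_py_alt]
  generalize pvPrelude s = lines
  by_cases h : lines.any pvCsvLine = true
  · -- a CSV line exists: slice [first, last+1] = trim both ends
    rw [pvAStart_of_any lines h 0,
      pvAEnd_of_any lines.reverse (by simpa using h)
        ((lines.length : Int) - 1) ((lines.length : Int) - 1)]
    have hk_le : (lines.reverse.takeWhile (fun l => !pvCsvLine l)).length ≤ lines.length := by
      have := (List.takeWhile_sublist (fun l => !pvCsvLine l) (l := lines.reverse)).length_le
      simpa using this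
    have e1 : (0 : Int) + ((lines.takeWhile (fun l => !pvCsvLine l)).length : Int)
        = (((lines.takeWhile (fun l => !pvCsvLine l)).length : Nat) : Int) := by ring
    have e2 : (lines.length : Int) - 1
          - ((lines.reverse.takeWhile (fun l => !pvCsvLine l)).length : Int) + 1
        = (((lines.length - (lines.reverse.takeWhile (fun l => !pvCsvLine l)).length : Nat)) : Int) := by
      rw [Nat.cast_sub hk_le]; ring
    rw [e1, e2, PySem.List.slice_natCast, if_pos h, slice_eq_trim lines h]
  · -- no CSV line: A slices [0, len), B keeps the list unchanged
    have h' : lines.any pvCsvLine = false := by simpa using h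
    rw [pvAStart_of_none lines h' 0,
      pvAEnd_of_none lines.reverse (by simpa using h')
        ((lines.length : Int) - 1) ((lines.length : Int) - 1)]
    have e2 : (lines.length : Int) - 1 + 1 = ((lines.length : Nat) : Int) := by ring
    rw [e2, show (0 : Int) = ((0 : Nat) : Int) from rfl, PySem.List.slice_natCast]
    simp [h']
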